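-- pv_equiv track=rewrite | github.com/Yarik9008/Schooll | ege/info/probnik/prob-3/5.py | f
-- ===== SOURCE A (Python) =====
-- def f(n):
--     bini = str(bin(n)[2:])
--     kol_1 = 0
--     kol_0 = 0
--     check = False
--     for i in bini:
--         if check:
--             if i == '1':
--                 kol_1 += 1
--         else:
--             if i == '0':
--                 kol_0 += 1
--         check = not check
--
--     return kol_1 - kol_0
-- ===== SOURCE B (Python) =====
-- def f(n):
--     s = str(bin(n)[2:])
--     return s[1::2].count('1') - s[0::2].count('0')
-- ===== Notes on version B (the rewrite author's own statement) =====
-- stated objective: simpler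
-- what changed: Replaces the parity-toggling flag and the single stateful loop with two strided slices (odd and even positions) counted independently.
import Mathlib
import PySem

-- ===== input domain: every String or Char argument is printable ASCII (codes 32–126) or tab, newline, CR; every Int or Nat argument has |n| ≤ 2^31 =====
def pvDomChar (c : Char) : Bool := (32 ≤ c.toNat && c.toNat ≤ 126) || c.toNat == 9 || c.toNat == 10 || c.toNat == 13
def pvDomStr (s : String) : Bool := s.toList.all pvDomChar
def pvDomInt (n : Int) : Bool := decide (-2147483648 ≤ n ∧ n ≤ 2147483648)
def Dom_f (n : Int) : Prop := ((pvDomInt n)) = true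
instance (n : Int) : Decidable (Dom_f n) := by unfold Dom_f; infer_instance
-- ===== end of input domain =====

-- B replaces A's parity-toggling flag loop with two independent strided-slice counts (objective: simpler).

-- ===== PORT A =====
-- one loop iteration of A: update (kol_1, kol_0, check) as the branch does, then check = not check
def fStep (s : Int × Int × Bool) (i : Char) : Int × Int × Bool :=
  if s.2.2 then
    (if i = '1' then (s.1 + 1, s.2.1, !s.2.2) else (s.1, s.2.1, !s.2.2))
  else
    (if i = '0' then (s.1, s.2.1 + 1, !s.2.2) else (s.1, s.2.1, !s.2.2))

def f (n : Int) : Int :=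
  let bini := PySem.List.slice (PySem.Int.toBinChars0b n) (some 2) none  -- bin(n)[2:]
  let st := bini.foldl fStep (0, 0, false)
  st.1 - st.2.1

-- ===== PORT B =====
def f_alt (n : Int) : Int :=
  let s := PySem.List.slice (PySem.Int.toBinChars0b n) (some 2) none    -- bin(n)[2:]
  let odd := (PySem.List.slice? s (some 1) none 2).getD []              -- s[1::2] (step ≠ 0, always some)
  let even := (PySem.List.slice? s none none 2).getD []                 -- s[0::2]
  -- str.count with a single-character needle is exactly the character count
  (odd.count '1' : Int) - (even.count '0' : Int)

-- ===== PRECONDITION & SPEC =====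
def Spec_f (n : Int) (out : Int) : Prop := out = f_alt n
instance (n : Int) (out : Int) : Decidable (Spec_f n out) := by unfold Spec_f; infer_instance

-- ===== CLAIM (what is proved, stated in full; the proofs are below) =====
def Claim_equal_f : Prop := ∀ (n : Int), Dom_f n → Spec_f n (f n)

-- ===== LEMMAS AND PROOFS =====

-- the elements at even positions of a list
def evens {α : Type} : List α → List α
  | [] => []
  | [a] => [a]
  | a :: _ :: l => a :: evens l

theorem evens_cons {α : Type} (a : α) (l : List α) : evens (a :: l) = a :: evens l.tail := by
  cases l <;> simp [evens]

theorem stride_even {α : Type} (xs : List α) :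
    (List.range ((xs.length + 1) / 2)).filterMap (fun k => xs[2 * k]?) = evens xs := by
  induction xs using evens.induct with
  | case1 => simp [evens]
  | case2 a => simp [evens, List.range_succ]
  | case3 a b l ih =>
    have hcnt : ((a :: b :: l).length + 1) / 2 = (l.length + 1) / 2 + 1 := by simp; omega
    rw [hcnt, List.range_succ_eq_map, List.filterMap_cons, List.filterMap_map]
    simp only [Function.comp_def]
    have hfun' : ∀ k : Nat, ((a :: b :: l)[2 * (k + 1)]? : Option α) = l[2 * k]? := by
      intro k
      have h1 : 2 * (k + 1) = (2 * k + 1) + 1 := by omega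
      simp [h1]
    simp only [hfun']
    simp [ih, evens]

theorem stride_odd {α : Type} (xs : List α) :
    (List.range (xs.length / 2)).filterMap (fun k => xs[1 + 2 * k]?) = evens xs.tail := by
  have hm : xs.length / 2 = (xs.tail.length + 1) / 2 := by
    cases xs <;> simp
  have hfun : ∀ k : Nat, (xs[1 + 2 * k]? : Option α) = xs.tail[2 * k]? := by
    intro k
    cases xs with
    | nil => simp
    | cons a l =>
      have h1 : 1 + 2 * k = 2 * k + 1 := by omega
      simp [h1]
  rw [hm]
  simp only [hfun]
  exact stride_even xs.tail

-- xs[0::2] is the even-position elements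
theorem slice?_zero_two {α : Type} (xs : List α) :
    PySem.List.slice? xs none none 2 = some (evens xs) := by
  simp only [PySem.List.slice?, PySem.List.sliceIndices]
  norm_num
  rw [← stride_even xs]
  congr 2
  split_ifs with h <;> omega

-- xs[1::2] is the odd-position elements
theorem slice?_one_two {α : Type} (xs : List α) :
    PySem.List.slice? xs (some 1) none 2 = some (evens xs.tail) := by
  simp only [PySem.List.slice?, PySem.List.sliceIndices]
  norm_num
  cases xs with
  | nil => simp [evens]
  | cons a l =>
    have hstart : min (1 : Int) ((a :: l).length : Int) = 1 := by
      simp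
    rw [hstart]
    rw [← stride_odd (a :: l)]
    congr 2
    split_ifs with h <;> simp only [List.length_cons] at h ⊢ <;> omega

theorem fStep_false (k1 k0 : Int) (a : Char) :
    fStep (k1, k0, false) a = (k1, (if a = '0' then k0 + 1 else k0), true) := by
  simp only [fStep]; split_ifs <;> simp_all

theorem fStep_true (k1 k0 : Int) (a : Char) :
    fStep (k1, k0, true) a = ((if a = '1' then k1 + 1 else k1), k0, false) := by
  simp only [fStep]; split_ifs <;> simp_all

-- A's loop: kol_1 counts '1' where check is true, kol_0 counts '0' where check is false
theorem loop_char (l : List Char) : ∀ (k1 k0 : Int) (c : Bool),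
    (l.foldl fStep (k1, k0, c)).1
      = k1 + ((if c then evens l else evens l.tail).count '1' : Int) ∧
    (l.foldl fStep (k1, k0, c)).2.1
      = k0 + ((if c then evens l.tail else evens l).count '0' : Int) := by
  induction l with
  | nil => intro k1 k0 c; simp [evens]
  | cons a t ih =>
    intro k1 k0 c
    cases c with
    | false =>
      rw [List.foldl_cons, fStep_false]
      rcases ih k1 (if a = '0' then k0 + 1 else k0) true with ⟨h1, h2⟩
      simp only [if_true] at h1 h2
      constructor
      · simpa using h1
      · rw [h2]
        simp only [if_false, List.tail_cons, evens_cons, List.count_cons, Bool.false_eq_true]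
        by_cases ha : a = '0' <;> simp [ha] <;> omega
    | true =>
      rw [List.foldl_cons, fStep_true]
      rcases ih (if a = '1' then k1 + 1 else k1) k0 false with ⟨h1, h2⟩
      simp only [Bool.false_eq_true, if_false] at h1 h2
      constructor
      · rw [h1]
        simp only [if_true, evens_cons, List.count_cons]
        by_cases ha : a = '1' <;> simp [ha] <;> omega
      · simpa using h2

-- ===== VERDICT (by name: the statement is the Claim_ definition above) =====
theorem f_spec : Claim_equal_f := by
  intro n _
  unfold Spec_f f f_alt
  rcases loop_char (PySem.List.slice (PySem.Int.toBinChars0b n) (some 2) none) 0 0 false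
    with ⟨h1, h2⟩
  simp only [h1, h2, slice?_one_two, slice?_zero_two, Option.getD_some]
  simp
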